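-- pv_equiv track=rewrite | github.com/MichaelKarabinosh/CustomAdventV2 | COOL TESTS/simp2.py | create_infection
-- ===== SOURCE A (Python) =====
-- def create_infection(pattern):
--     relative_list = []
--     lines = pattern.split(",")
--     cx = cy = 0
--
--     for i in range(len(lines)):
--         for j in range(len(lines[i])):
--             if lines[i][j] == "W":
--                 cx = j
--                 cy = i
--
--     for i in range(len(lines)):
--         for j in range(len(lines[i])):
--             if lines[i][j] == "1":
--                 relative_list.append((j - cx, cy - i))
--
--     return relative_list
-- ===== SOURCE B (Python) =====
-- def create_infection(pattern):
--     # Single grid scan collecting absolute '1' positions and the last 'W',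
--     # then one short pass over the collected positions (same output as A).
--     lines = pattern.split(",")
--     cx = cy = 0
--     ones = []
--     for i, line in enumerate(lines):
--         for j, ch in enumerate(line):
--             if ch == "W":
--                 cx, cy = j, i
--             elif ch == "1":
--                 ones.append((j, i))
--     return [(j - cx, cy - i) for (j, i) in ones]
-- ===== Notes on version B (the rewrite author's own statement) =====
-- stated objective: faster
-- what changed: A scans the whole grid twice (one full pass to find the last 'W', a second full pass emitting relative positions); B makes a single grid scan that tracks the last 'W' and collects absolute '1' positions, then maps only those collected positions to relative form.
import Mathlib
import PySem

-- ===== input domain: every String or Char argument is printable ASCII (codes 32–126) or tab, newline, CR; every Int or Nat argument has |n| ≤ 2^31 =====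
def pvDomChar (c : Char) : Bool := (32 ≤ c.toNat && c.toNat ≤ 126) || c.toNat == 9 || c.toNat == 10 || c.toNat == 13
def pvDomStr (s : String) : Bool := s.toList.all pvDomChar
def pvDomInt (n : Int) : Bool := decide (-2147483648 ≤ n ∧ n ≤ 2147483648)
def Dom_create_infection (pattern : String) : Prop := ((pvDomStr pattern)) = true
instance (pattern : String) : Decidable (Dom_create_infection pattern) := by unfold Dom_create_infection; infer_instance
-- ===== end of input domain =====

-- B replaces A's two full grid scans by one grid scan plus a pass over only the collected '1' positions.

-- ===== PORT A =====
def create_infection (pattern : String) : List (Int × Int) :=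
  let lines := PySem.Chars.splitOn pattern.toList [',']
  let cxy : Int × Int :=
    (PySem.List.enumerate lines).foldl (fun c p =>
      (PySem.List.enumerate p.2).foldl (fun c q => if q.2 = 'W' then (q.1, p.1) else c) c) (0, 0)
  (PySem.List.enumerate lines).foldl (fun acc p =>
    (PySem.List.enumerate p.2).foldl (fun acc q =>
      if q.2 = '1' then acc ++ [(q.1 - cxy.1, cxy.2 - p.1)] else acc) acc) []

-- ===== PORT B =====
def create_infection_alt (pattern : String) : List (Int × Int) :=
  let lines := PySem.Chars.splitOn pattern.toList [',']
  let st : Int × Int × List (Int × Int) :=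
    (PySem.List.enumerate lines).foldl (fun st p =>
      (PySem.List.enumerate p.2).foldl (fun st q =>
        if q.2 = 'W' then (q.1, p.1, st.2.2)
        else if q.2 = '1' then (st.1, st.2.1, st.2.2 ++ [(q.1, p.1)])
        else st) st) (0, 0, [])
  st.2.2.map (fun q => (q.1 - st.1, st.2.1 - q.2))

-- ===== PRECONDITION & SPEC =====
def Spec_create_infection (pattern : String) (out : List (Int × Int)) : Prop := out = create_infection_alt pattern
instance (pattern : String) (out : List (Int × Int)) : Decidable (Spec_create_infection pattern out) := by unfold Spec_create_infection; infer_instance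

-- ===== CLAIM (what is proved, stated in full; the proofs are below) =====
def Claim_equal_create_infection : Prop := ∀ (pattern : String), Dom_create_infection pattern → Spec_create_infection pattern (create_infection pattern)

-- ===== LEMMAS AND PROOFS =====

-- A's W-scan, starting from an arbitrary current position
def wfold (L : List (Int × List Char)) : Int × Int :=
  L.foldl (fun c p => (PySem.List.enumerate p.2).foldl (fun c q => if q.2 = 'W' then (q.1, p.1) else c) c) (0, 0)

-- B's combined single-pass fold
def bfold (L : List (Int × List Char)) : Int × Int × List (Int × Int) :=
  L.foldl (fun st p =>
    (PySem.List.enumerate p.2).foldl (fun st q =>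
      if q.2 = 'W' then (q.1, p.1, st.2.2)
      else if q.2 = '1' then (st.1, st.2.1, st.2.2 ++ [(q.1, p.1)])
      else st) st) (0, 0, [])

-- B's combined fold splits into the W-fold and an absolute-'1'-collecting fold (inner loop).
theorem inner_split (i : Int) (l : List (Int × Char)) (st : Int × Int × List (Int × Int)) :
    l.foldl (fun st q =>
        if q.2 = 'W' then (q.1, i, st.2.2)
        else if q.2 = '1' then (st.1, st.2.1, st.2.2 ++ [(q.1, i)])
        else st) st
    = ((l.foldl (fun c q => if q.2 = 'W' then (q.1, i) else c) (st.1, st.2.1)).1,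
       (l.foldl (fun c q => if q.2 = 'W' then (q.1, i) else c) (st.1, st.2.1)).2,
       l.foldl (fun acc q => if q.2 = '1' then acc ++ [(q.1, i)] else acc) st.2.2) := by
  induction l generalizing st with
  | nil => rfl
  | cons q l ih =>
    simp only [List.foldl_cons]
    by_cases hW : q.2 = 'W'
    · have h1 : q.2 ≠ '1' := by rw [hW]; decide
      simp [hW, ih]
    · by_cases h1 : q.2 = '1' <;> simp [hW, h1, ih]

-- the same split for the outer fold
theorem outer_split (L : List (Int × List Char)) (st : Int × Int × List (Int × Int)) :
    L.foldl (fun st p =>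
        (PySem.List.enumerate p.2).foldl (fun st q =>
          if q.2 = 'W' then (q.1, p.1, st.2.2)
          else if q.2 = '1' then (st.1, st.2.1, st.2.2 ++ [(q.1, p.1)])
          else st) st) st
    = ((L.foldl (fun c p => (PySem.List.enumerate p.2).foldl (fun c q => if q.2 = 'W' then (q.1, p.1) else c) c) (st.1, st.2.1)).1,
       (L.foldl (fun c p => (PySem.List.enumerate p.2).foldl (fun c q => if q.2 = 'W' then (q.1, p.1) else c) c) (st.1, st.2.1)).2,
       L.foldl (fun acc p => (PySem.List.enumerate p.2).foldl (fun acc q => if q.2 = '1' then acc ++ [(q.1, p.1)] else acc) acc) st.2.2) := by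
  induction L generalizing st with
  | nil => rfl
  | cons p L ih =>
    simp only [List.foldl_cons]
    rw [inner_split, ih]

-- A's relative-emitting fold is the map of the absolute-collecting fold (inner loop).
theorem inner_map (cx cy : Int) (i : Int) (l : List (Int × Char)) (acc : List (Int × Int)) :
    l.foldl (fun acc q => if q.2 = '1' then acc ++ [(q.1 - cx, cy - i)] else acc) (acc.map (fun q : Int × Int => (q.1 - cx, cy - q.2)))
    = (l.foldl (fun acc q => if q.2 = '1' then acc ++ [(q.1, i)] else acc) acc).map (fun q : Int × Int => (q.1 - cx, cy - q.2)) := by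
  induction l generalizing acc with
  | nil => rfl
  | cons q l ih =>
    simp only [List.foldl_cons]
    by_cases h1 : q.2 = '1'
    · simp only [h1, if_pos]
      simpa using ih (acc ++ [(q.1, i)])
    · simp [h1, ih]

-- the same mapping fact for the outer fold
theorem outer_map (cx cy : Int) (L : List (Int × List Char)) (acc : List (Int × Int)) :
    L.foldl (fun acc p => (PySem.List.enumerate p.2).foldl (fun acc q => if q.2 = '1' then acc ++ [(q.1 - cx, cy - p.1)] else acc) acc) (acc.map (fun q : Int × Int => (q.1 - cx, cy - q.2)))
    = (L.foldl (fun acc p => (PySem.List.enumerate p.2).foldl (fun acc q => if q.2 = '1' then acc ++ [(q.1, p.1)] else acc) acc) acc).map (fun q : Int × Int => (q.1 - cx, cy - q.2)) := by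
  induction L generalizing acc with
  | nil => rfl
  | cons p L ih =>
    simp only [List.foldl_cons]
    rw [inner_map, ih]

-- the two port bodies, over an arbitrary enumerated grid
theorem master (L : List (Int × List Char)) :
    L.foldl (fun acc p =>
      (PySem.List.enumerate p.2).foldl (fun acc q =>
        if q.2 = '1' then acc ++ [(q.1 - (wfold L).1, (wfold L).2 - p.1)] else acc) acc) ([] : List (Int × Int))
    = ((bfold L).2.2).map (fun q => (q.1 - (bfold L).1, (bfold L).2.1 - q.2)) := by
  have hb : bfold L
      = ((wfold L).1, (wfold L).2,
         L.foldl (fun acc p => (PySem.List.enumerate p.2).foldl (fun acc q => if q.2 = '1' then acc ++ [(q.1, p.1)] else acc) acc) []) :=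
    outer_split L (0, 0, [])
  have h1 : (bfold L).1 = (wfold L).1 := by rw [hb]
  have h2 : (bfold L).2.1 = (wfold L).2 := by rw [hb]
  have h3 : (bfold L).2.2
      = L.foldl (fun acc p => (PySem.List.enumerate p.2).foldl (fun acc q => if q.2 = '1' then acc ++ [(q.1, p.1)] else acc) acc) [] := by
    rw [hb]
  rw [h1, h2, h3]
  have h4 := outer_map (wfold L).1 (wfold L).2 L []
  rw [List.map_nil] at h4
  exact h4

-- ===== VERDICT (by name: the statement is the Claim_ definition above) =====
theorem create_infection_spec : Claim_equal_create_infection := by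
  intro pattern _
  unfold Spec_create_infection create_infection create_infection_alt
  exact master (PySem.List.enumerate (PySem.Chars.splitOn pattern.toList [',']))
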